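-- pv_equiv track=rewrite | github.com/cedricholz/Wizards-NP-Constraint-Satisfaction | utils.py | check_total_violations
-- ===== SOURCE A (Python) =====
-- def check_total_violations(ordered_wizards, constraint_map):
--     """
--     Checks how many violations are present
--     in the current wizard ordering
--
--     Input:
--         ordered_wizards: Current ordering of the wizards
--         constraint_map: Wizard names mapped to a list of their constraits
--
--     Output:
--         violations: Number of violations
--     """
--     violations = 0
--     prev_wizards = set(ordered_wizards[:1])
--     next_wizards = set(ordered_wizards[1:])
--
--     for i in range(1, len(ordered_wizards) - 1):
--         cur_wizard = ordered_wizards[i]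
--         next_wizards.remove(cur_wizard)
--
--         if cur_wizard in constraint_map:
--             cur_constraints = constraint_map[cur_wizard]
--             for constraint in cur_constraints:
--                 wizard1 = constraint[0]
--                 wizard2 = constraint[1]
--
--                 if wizard1 in prev_wizards and wizard2 in next_wizards:
--                     violations += 1
--
--                 elif wizard2 in prev_wizards and wizard1 in next_wizards:
--                     violations += 1
--
--         prev_wizards.add(cur_wizard)
--     return violations
-- ===== SOURCE B (Python) =====
-- def check_total_violations(ordered_wizards, constraint_map):
--     n = len(ordered_wizards)
--     pos = {w: i for i, w in enumerate(ordered_wizards)}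
--     violations = 0
--     for wizard, constraints in constraint_map.items():
--         i = pos.get(wizard)
--         if i is not None and 1 <= i <= n - 2:
--             for w1, w2 in constraints:
--                 p1 = pos.get(w1)
--                 p2 = pos.get(w2)
--                 if p1 is not None and p2 is not None and (p1 < i < p2 or p2 < i < p1):
--                     violations += 1
--     return violations
-- ===== Notes on version B (the rewrite author's own statement) =====
-- stated objective: alternative
-- what changed: Replaces A's position scan with incrementally maintained prev/next sets by a position index built once and a single pass over the constraint dict's entries, counting violations by index comparisons.
-- outside the precondition, e.g. on check_total_violations(['a', 'x', 'a'], {'x': [('a', 'a')]}): A returns 1, B returns 0; on check_total_violations(['a', 'b', 'b', 'c'], {}): A raises KeyError, B returns 0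
import Mathlib
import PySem

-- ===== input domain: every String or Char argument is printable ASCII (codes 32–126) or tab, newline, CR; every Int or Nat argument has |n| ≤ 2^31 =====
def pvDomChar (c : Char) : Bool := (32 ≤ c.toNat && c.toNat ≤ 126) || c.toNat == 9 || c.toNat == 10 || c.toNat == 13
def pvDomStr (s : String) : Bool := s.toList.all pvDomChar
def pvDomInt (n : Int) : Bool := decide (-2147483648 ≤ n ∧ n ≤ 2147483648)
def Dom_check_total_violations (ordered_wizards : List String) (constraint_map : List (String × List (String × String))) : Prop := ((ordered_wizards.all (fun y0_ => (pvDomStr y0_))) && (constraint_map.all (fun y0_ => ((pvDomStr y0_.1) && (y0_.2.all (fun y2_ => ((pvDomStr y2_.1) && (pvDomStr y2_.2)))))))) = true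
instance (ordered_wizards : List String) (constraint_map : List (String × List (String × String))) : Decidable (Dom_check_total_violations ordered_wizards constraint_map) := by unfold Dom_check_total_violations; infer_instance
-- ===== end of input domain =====

-- B replaces A's incrementally maintained prev/next sets by a position index built once and a
-- single pass over the constraint dict's entries (objective: alternative, same cost).

-- ===== PORT A =====
-- inner loop over the current wizard's constraints (prev/next set membership tests)
def ctvInner (prev nxt : PySem.Set String) (v : Int) (cs : List (String × String)) : Int :=
  cs.foldl (fun acc c =>
    if PySem.Set.contains prev c.1 && PySem.Set.contains nxt c.2 then acc + 1
    else if PySem.Set.contains prev c.2 && PySem.Set.contains nxt c.1 then acc + 1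
    else acc) v

-- one iteration of A's `for i in range(1, len(ordered_wizards) - 1)` loop;
-- `none` propagates the KeyError of `next_wizards.remove` (excluded by Pre_)
def ctvStep (ws : List String) (d : PySem.Dict String (List (String × String)))
    (st : Option (Int × PySem.Set String × PySem.Set String)) (i : Int) :
    Option (Int × PySem.Set String × PySem.Set String) :=
  match st with
  | none => none
  | some (v, prev, nxt) =>
    -- ordered_wizards[i]: i is always in range here, so the default is never used
    let cur := PySem.List.pyGetD ws i ""
    match PySem.Set.remove? nxt cur with
    | none => none
    | some nxt' =>
      let v' := match d.get? cur with
        | some cs => ctvInner prev nxt' v cs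
        | none => v
      some (v', PySem.Set.add prev cur, nxt')

def check_total_violations (ordered_wizards : List String) (constraint_map : List (String × List (String × String))) : Int :=
  match (PySem.List.pyRange 1 ((ordered_wizards.length : Int) - 1) 1).foldl
      (ctvStep ordered_wizards (PySem.Dict.ofList constraint_map))
      (some (0, PySem.Set.ofList (PySem.List.slice ordered_wizards none (some 1)),
                PySem.Set.ofList (PySem.List.slice ordered_wizards (some 1) none))) with
  | some (v, _, _) => v
  | none => 0

-- ===== PORT B =====
-- pos = {w: i for i, w in enumerate(ordered_wizards)}
def ctvPosDict (ws : List String) : PySem.Dict String Int :=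
  (PySem.List.enumerate ws 0).foldl (fun d p => d.insert p.2 p.1) PySem.Dict.empty

-- inner loop of B: count a constraint whose two positions straddle i
def ctvAltInner (pos : PySem.Dict String Int) (i : Int) (acc : Int) (c : String × String) : Int :=
  match pos.get? c.1, pos.get? c.2 with
  | some p1, some p2 => if (p1 < i ∧ i < p2) ∨ (p2 < i ∧ i < p1) then acc + 1 else acc
  | _, _ => acc

def check_total_violations_alt (ordered_wizards : List String) (constraint_map : List (String × List (String × String))) : Int :=
  let n : Int := ordered_wizards.length
  let pos := ctvPosDict ordered_wizards
  (PySem.Dict.ofList constraint_map).items.foldl (fun acc e =>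
    match pos.get? e.1 with
    | some i => if 1 ≤ i ∧ i ≤ n - 2 then e.2.foldl (ctvAltInner pos i) acc else acc
    | none => acc) 0

-- ===== PRECONDITION & SPEC =====
-- Pre_ excludes orderings with a duplicated wizard name, on which A's set-with-remove
-- bookkeeping either raises KeyError or returns an accidental count of the collapsed sets.
def Pre_check_total_violations (ordered_wizards : List String) (constraint_map : List (String × List (String × String))) : Prop :=
  ordered_wizards.Nodup
instance (ordered_wizards : List String) (constraint_map : List (String × List (String × String))) : Decidable (Pre_check_total_violations ordered_wizards constraint_map) := by unfold Pre_check_total_violations; infer_instance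

def pvWitness_check_total_violations : List String × (List (String × List (String × String))) :=
  (["a", "b", "c"], [("b", [("a", "c")])])

def Spec_check_total_violations (ordered_wizards : List String) (constraint_map : List (String × List (String × String))) (out : Int) : Prop := out = check_total_violations_alt ordered_wizards constraint_map
instance (ordered_wizards : List String) (constraint_map : List (String × List (String × String))) (out : Int) : Decidable (Spec_check_total_violations ordered_wizards constraint_map out) := by unfold Spec_check_total_violations; infer_instance

-- ===== CLAIM (what is proved, stated in full; the proofs are below) =====
def Claim_equal_check_total_violations : Prop := ∀ (ordered_wizards : List String) (constraint_map : List (String × List (String × String))), Dom_check_total_violations ordered_wizards constraint_map → Pre_check_total_violations ordered_wizards constraint_map → Spec_check_total_violations ordered_wizards constraint_map (check_total_violations ordered_wizards constraint_map)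

-- ===== LEMMAS AND PROOFS =====

-- a constraint straddles position j of ws (both endpoints present, on opposite sides of j)
def ctvStrad (ws : List String) (j : Nat) (c : String × String) : Bool :=
  decide (c.1 ∈ ws) && decide (c.2 ∈ ws) &&
    ((decide (ws.idxOf c.1 < j) && decide (j < ws.idxOf c.2)) ||
     (decide (ws.idxOf c.2 < j) && decide (j < ws.idxOf c.1)))

-- A's contribution at interior position j
def ctvG (ws : List String) (d : PySem.Dict String (List (String × String))) (j : Nat) : Int :=
  match d.get? (ws.getD j "") with
  | some cs => (cs.countP (ctvStrad ws j) : Int)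
  | none => 0

-- the violations charged to the wizard named w
def ctvPhi (ws : List String) (d : PySem.Dict String (List (String × String))) (w : String) : Int :=
  ((d.getD w []).countP (ctvStrad ws (ws.idxOf w)) : Int)

-- the wizards at interior positions, in order
def ctvL1 (ws : List String) : List String :=
  (List.range' 1 (ws.length - 2)).map (fun j => ws.getD j "")

lemma ctvMemDropIff {ws : List String} (h : ws.Nodup) (j : Nat) (w : String) :
    w ∈ ws.drop j ↔ w ∈ ws ∧ j ≤ ws.idxOf w := by
  have hsplit : ws.take j ++ ws.drop j = ws := List.take_append_drop j ws
  have h2 : (ws.take j ++ ws.drop j).Nodup := by rw [hsplit]; exact h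
  rw [List.nodup_append] at h2
  constructor
  · intro hd
    have hw : w ∈ ws := by rw [← hsplit]; exact List.mem_append_right _ hd
    refine ⟨hw, ?_⟩
    by_contra hlt
    push Not at hlt
    have ht : w ∈ ws.take j := (List.mem_take_iff_idxOf_lt hw).2 hlt
    exact h2.2.2 w ht w hd rfl
  · rintro ⟨hw, hle⟩
    have : w ∈ ws.take j ++ ws.drop j := by rw [hsplit]; exact hw
    rcases List.mem_append.1 this with ht | hd
    · have := (List.mem_take_iff_idxOf_lt hw).1 ht; omega
    · exact hd

lemma ctvInnerA {ws : List String} (h : ws.Nodup) {j : Nat}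
    (v : Int) (cs : List (String × String)) :
    ctvInner (ws.take j) (ws.drop (j + 1)) v cs = v + (cs.countP (ctvStrad ws j) : Int) := by
  have hmem1 : ∀ w, (PySem.Set.contains (ws.take j) w = true) ↔ (w ∈ ws ∧ ws.idxOf w < j) := by
    intro w
    rw [PySem.Set.contains_iff]
    constructor
    · intro ht
      have hw : w ∈ ws := List.mem_of_mem_take ht
      exact ⟨hw, (List.mem_take_iff_idxOf_lt hw).1 ht⟩
    · rintro ⟨hw, hlt⟩
      exact (List.mem_take_iff_idxOf_lt hw).2 hlt
  have hmem2 : ∀ w, (PySem.Set.contains (ws.drop (j + 1)) w = true) ↔ (w ∈ ws ∧ j < ws.idxOf w) := by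
    intro w
    rw [PySem.Set.contains_iff, ctvMemDropIff h]
    constructor <;> rintro ⟨hw, h'⟩ <;> exact ⟨hw, by omega⟩
  induction cs generalizing v with
  | nil => simp [ctvInner]
  | cons c cs ih =>
    have hstep : (if PySem.Set.contains (ws.take j) c.1 && PySem.Set.contains (ws.drop (j+1)) c.2 then v + 1
        else if PySem.Set.contains (ws.take j) c.2 && PySem.Set.contains (ws.drop (j+1)) c.1 then v + 1
        else v) = v + (if ctvStrad ws j c then 1 else 0) := by
      simp only [ctvStrad, Bool.and_eq_true, Bool.or_eq_true, decide_eq_true_eq, hmem1, hmem2]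
      split_ifs <;> first | omega | tauto
    have hunf : ctvInner (ws.take j) (ws.drop (j+1)) v (c :: cs)
        = ctvInner (ws.take j) (ws.drop (j+1))
            (if PySem.Set.contains (ws.take j) c.1 && PySem.Set.contains (ws.drop (j+1)) c.2 then v + 1
             else if PySem.Set.contains (ws.take j) c.2 && PySem.Set.contains (ws.drop (j+1)) c.1 then v + 1
             else v) cs := rfl
    rw [hunf, hstep, ih, List.countP_cons]
    split_ifs <;> push_cast <;> ring

lemma ctvPosFoldGet (ws : List String) (h : ws.Nodup) :
    ∀ (s : Int) (d : PySem.Dict String Int) (w : String),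
    ((PySem.List.enumerate ws s).foldl (fun d p => d.insert p.2 p.1) d).get? w
      = if w ∈ ws then some (s + (ws.idxOf w : Int)) else d.get? w := by
  induction ws with
  | nil => intro s d w; simp [PySem.List.enumerate]
  | cons x xs ih =>
    intro s d w
    rw [PySem.List.enumerate_cons]
    simp only [List.foldl_cons]
    rw [ih (List.nodup_cons.1 h).2 (s + 1) (d.insert x s) w]
    by_cases hx : w = x
    · subst hx
      have hnx : w ∉ xs := (List.nodup_cons.1 h).1
      simp [hnx]
    · by_cases hmem : w ∈ xs
      · simp only [hmem, if_true, List.mem_cons, hx, false_or, if_true]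
        have : (x :: xs).idxOf w = xs.idxOf w + 1 := by
          rw [List.idxOf_cons]
          have : (x == w) = false := by simp [Ne.symm hx]
          simp [this]
        rw [this]
        push_cast
        ring_nf
      · simp only [hmem, if_false, List.mem_cons, hx, false_or, if_false]
        rw [PySem.Dict.get?_insert]
        simp [hx]

lemma ctvPosGet {ws : List String} (h : ws.Nodup) (w : String) :
    (ctvPosDict ws).get? w = if w ∈ ws then some ((ws.idxOf w : Int)) else none := by
  rw [ctvPosDict, ctvPosFoldGet ws h 0 PySem.Dict.empty w]
  simp [PySem.Dict.get?_empty]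

lemma ctvInnerB {ws : List String} (h : ws.Nodup) (j : Nat)
    (acc : Int) (cs : List (String × String)) :
    cs.foldl (ctvAltInner (ctvPosDict ws) (j : Int)) acc = acc + (cs.countP (ctvStrad ws j) : Int) := by
  induction cs generalizing acc with
  | nil => simp
  | cons c cs ih =>
    rw [List.foldl_cons, ih, List.countP_cons]
    have hstep : ctvAltInner (ctvPosDict ws) (j : Int) acc c = acc + (if ctvStrad ws j c then 1 else 0) := by
      rw [ctvAltInner, ctvPosGet h c.1, ctvPosGet h c.2]
      by_cases h1 : c.1 ∈ ws <;> by_cases h2 : c.2 ∈ ws <;>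
        simp only [h1, h2, if_true, if_false, ctvStrad, decide_eq_true_eq, Bool.and_eq_true,
          Bool.or_eq_true, decide_eq_true_eq, true_and]
      · split_ifs with ha hb <;> omega
      all_goals simp [h1, h2]
    rw [hstep]
    split_ifs <;> push_cast <;> ring

lemma ctvLoopA (ws : List String) (d : PySem.Dict String (List (String × String))) (h : ws.Nodup) :
    ∀ (k j : Nat) (v : Int), j + k = ws.length - 1 → 1 ≤ j →
    (PySem.List.pyRange (j : Int) ((ws.length : Int) - 1) 1).foldl (ctvStep ws d)
        (some (v, ws.take j, ws.drop j))
      = some (v + ((List.range' j k).map (ctvG ws d)).sum,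
              ws.take (ws.length - 1), ws.drop (ws.length - 1)) := by
  intro k
  induction k with
  | zero =>
    intro j v hjk hj
    have hj' : j = ws.length - 1 := by omega
    rw [PySem.List.pyRange_one_eq_nil (by omega)]
    subst hj'
    simp
  | succ k ih =>
    intro j v hjk hj
    have hjlt : j < ws.length - 1 := by omega
    have hjlen : j < ws.length := by omega
    rw [PySem.List.pyRange_one_cons (by omega)]
    rw [List.foldl_cons]
    have hcur : PySem.List.pyGetD ws (j : Int) "" = ws[j] := by
      rw [PySem.List.pyGetD_natCast, List.getD_eq_getElem _ _ hjlen]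
    have hdropj : ws.drop j = ws[j] :: ws.drop (j + 1) := List.drop_eq_getElem_cons hjlen
    have hnd : (ws.drop j).Nodup := (List.drop_sublist j ws).nodup h
    have hnotmem : ws[j] ∉ ws.drop (j + 1) := by
      rw [hdropj] at hnd
      exact (List.nodup_cons.1 hnd).1
    have hremove : PySem.Set.remove? (ws.drop j) ws[j] = some (ws.drop (j + 1)) := by
      rw [PySem.Set.remove?]
      have hc : PySem.Set.contains (ws.drop j) ws[j] = true := by
        rw [PySem.Set.contains_iff, hdropj]; exact List.mem_cons_self
      rw [hc, if_pos rfl]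
      congr 1
      rw [PySem.Set.discard, hdropj]
      rw [List.filter_cons_of_neg (by simp)]
      rw [List.filter_eq_self.2]
      intro a ha
      simp only [Bool.not_eq_true', beq_eq_false_iff_ne, ne_eq]
      rintro rfl
      exact hnotmem ha
    have hadd : PySem.Set.add (ws.take j) ws[j] = ws.take (j + 1) := by
      rw [PySem.Set.add_of_not_mem]
      · rw [List.take_add_one]
        simp [List.getElem?_eq_getElem hjlen]
      · intro hmem
        have := (List.mem_take_iff_idxOf_lt (List.mem_of_mem_take hmem)).1 hmem
        rw [List.Nodup.idxOf_getElem h j hjlen] at this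
        omega
    have hstep : ctvStep ws d (some (v, ws.take j, ws.drop j)) (j : Int)
        = some (v + ctvG ws d j, ws.take (j + 1), ws.drop (j + 1)) := by
      rw [ctvStep]
      simp only [hcur, hremove]
      rw [ctvG, List.getD_eq_getElem _ _ hjlen]
      cases hget : d.get? ws[j] with
      | none => simp [hadd]
      | some cs => simp [hadd, ctvInnerA h v cs]
    rw [hstep]
    have : ((j : Int) + 1) = ((j + 1 : Nat) : Int) := by push_cast; ring
    rw [this, ih (j + 1) (v + ctvG ws d j) (by omega) (by omega), List.range'_succ,
        List.map_cons, List.sum_cons, ← add_assoc]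

lemma ctvSumIte {α : Type} [DecidableEq α] (A B : List α) (φ : α → Int)
    (hA : A.Nodup) (hB : B.Nodup) :
    (A.map (fun w => if w ∈ B then φ w else 0)).sum
      = (B.map (fun w => if w ∈ A then φ w else 0)).sum := by
  have hfil : ∀ (X Y : List α), (X.map (fun w => if w ∈ Y then φ w else 0)).sum
      = ((X.filter (fun w => decide (w ∈ Y))).map φ).sum := by
    intro X Y
    induction X with
    | nil => simp
    | cons x xs ih =>
      by_cases hx : x ∈ Y <;> simp [hx, ih]
  rw [hfil, hfil]
  have hperm : (A.filter (fun w => decide (w ∈ B))).Perm (B.filter (fun w => decide (w ∈ A))) := by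
    rw [List.perm_ext_iff_of_nodup (hA.filter _) (hB.filter _)]
    intro a
    simp only [List.mem_filter, decide_eq_true_eq]
    tauto
  exact (hperm.map φ).sum_eq

lemma ctvL1Mem {ws : List String} (h : ws.Nodup) (w : String) :
    w ∈ ctvL1 ws ↔ w ∈ ws ∧ 1 ≤ ws.idxOf w ∧ ws.idxOf w ≤ ws.length - 2 := by
  rw [ctvL1]
  simp only [List.mem_map, List.mem_range'_1]
  constructor
  · rintro ⟨j, ⟨hj1, hj2⟩, rfl⟩
    have hjlen : j < ws.length := by omega
    rw [List.getD_eq_getElem _ _ hjlen]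
    refine ⟨List.getElem_mem hjlen, ?_⟩
    rw [List.Nodup.idxOf_getElem h j hjlen]
    omega
  · rintro ⟨hw, hi1, hi2⟩
    have hidx : ws.idxOf w < ws.length := List.idxOf_lt_length_of_mem hw
    refine ⟨ws.idxOf w, ⟨hi1, by omega⟩, ?_⟩
    rw [List.getD_eq_getElem _ _ hidx]
    exact List.getElem_idxOf hidx

lemma ctvL1Nodup {ws : List String} (h : ws.Nodup) : (ctvL1 ws).Nodup := by
  rw [ctvL1]
  apply List.Nodup.map_on _ (List.nodup_range' 1)
  intro x hx y hy hxy
  rw [List.mem_range'_1] at hx hy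
  have hxlen : x < ws.length := by omega
  have hylen : y < ws.length := by omega
  rw [List.getD_eq_getElem _ _ hxlen, List.getD_eq_getElem _ _ hylen] at hxy
  have h1 := List.Nodup.idxOf_getElem h x hxlen
  have h2 := List.Nodup.idxOf_getElem h y hylen
  rw [← h1, ← h2, hxy]

-- B's outer loop as a sum over the dict entries
lemma ctvBFold {ws : List String} (h : ws.Nodup) :
    ∀ (L : List (String × List (String × String))) (acc : Int),
    L.foldl (fun acc e =>
      match (ctvPosDict ws).get? e.1 with
      | some i => if 1 ≤ i ∧ i ≤ (ws.length : Int) - 2 then e.2.foldl (ctvAltInner (ctvPosDict ws) i) acc else acc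
      | none => acc) acc
    = acc + (L.map (fun e =>
        if e.1 ∈ ws ∧ 1 ≤ ws.idxOf e.1 ∧ ws.idxOf e.1 ≤ ws.length - 2
        then (e.2.countP (ctvStrad ws (ws.idxOf e.1)) : Int) else 0)).sum := by
  intro L
  induction L with
  | nil => intro acc; simp
  | cons e L ih =>
    intro acc
    rw [List.foldl_cons, List.map_cons, List.sum_cons]
    rw [ctvPosGet h e.1]
    by_cases hw : e.1 ∈ ws
    · simp only [hw, if_true, true_and]
      have hidx : ws.idxOf e.1 < ws.length := List.idxOf_lt_length_of_mem hw
      by_cases hint : 1 ≤ ws.idxOf e.1 ∧ ws.idxOf e.1 ≤ ws.length - 2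
      · rw [if_pos (by constructor <;> [exact_mod_cast hint.1; omega]), if_pos hint]
        rw [ctvInnerB h (ws.idxOf e.1) acc e.2, ih]
        ring
      · rw [if_neg (by intro hc; exact hint ⟨by exact_mod_cast hc.1, by omega⟩), if_neg hint]
        rw [ih]
        ring
    · simp only [hw, false_and, if_false]
      rw [ih]
      ring

-- ===== VERDICT (by name: the statement is the Claim_ definition above) =====
theorem check_total_violations_spec : Claim_equal_check_total_violations := by
  intro ws cm _ hpre
  have hnd : ws.Nodup := hpre
  unfold Spec_check_total_violations
  -- A's loop is the sum of per-position contributions over the interior positions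
  have hA : check_total_violations ws cm
      = ((List.range' 1 (ws.length - 2)).map (ctvG ws (PySem.Dict.ofList cm))).sum := by
    rw [check_total_violations]
    by_cases hn : ws.length ≤ 1
    · rw [PySem.List.pyRange_one_eq_nil (by omega)]
      have : ws.length - 2 = 0 := by omega
      simp [this]
    · have hn2 : 2 ≤ ws.length := by omega
      rw [PySem.List.slice_to ws (by omega : (0:Int) ≤ 1),
          PySem.List.slice_from ws (by omega : (0:Int) ≤ 1)]
      have ht1 : ((1 : Int)).toNat = 1 := rfl
      rw [ht1]
      rw [PySem.Set.ofList_eq_self_of_nodup _ ((List.take_sublist 1 ws).nodup hnd),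
          PySem.Set.ofList_eq_self_of_nodup _ ((List.drop_sublist 1 ws).nodup hnd)]
      have hloop := ctvLoopA ws (PySem.Dict.ofList cm) hnd (ws.length - 2) 1 0 (by omega) le_rfl
      have hc1 : ((1 : Nat) : Int) = (1 : Int) := rfl
      rw [hc1] at hloop
      rw [hloop]
      simp
  -- B is the sum of per-entry contributions over the dict's entries
  have hB : check_total_violations_alt ws cm
      = ((PySem.Dict.ofList cm).items.map (fun e =>
          if e.1 ∈ ws ∧ 1 ≤ ws.idxOf e.1 ∧ ws.idxOf e.1 ≤ ws.length - 2
          then (e.2.countP (ctvStrad ws (ws.idxOf e.1)) : Int) else 0)).sum := by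
    rw [check_total_violations_alt, ctvBFold hnd]
    ring
  rw [hA, hB]
  -- rewrite A's sum as a sum over the interior wizards
  have hkeys : (PySem.Dict.ofList cm).keys.Nodup := PySem.Dict.nodup_keys_ofList cm
  have hAmap : (List.range' 1 (ws.length - 2)).map (ctvG ws (PySem.Dict.ofList cm))
      = (ctvL1 ws).map (fun w => if w ∈ (PySem.Dict.ofList cm).keys
          then ctvPhi ws (PySem.Dict.ofList cm) w else 0) := by
    rw [ctvL1, List.map_map]
    apply List.map_congr_left
    intro j hj
    rw [List.mem_range'_1] at hj
    have hjlen : j < ws.length := by omega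
    simp only [Function.comp]
    rw [ctvG, List.getD_eq_getElem _ _ hjlen]
    cases hget : (PySem.Dict.ofList cm).get? ws[j] with
    | none =>
      rw [if_neg (by rw [← PySem.Dict.get?_eq_none_iff_not_mem_keys]; exact hget)]
    | some cs =>
      have hmem : ws[j] ∈ (PySem.Dict.ofList cm).keys := by
        by_contra hc
        rw [← PySem.Dict.get?_eq_none_iff_not_mem_keys] at hc
        rw [hc] at hget
        exact Option.some_ne_none cs hget.symm
      have hgd : (PySem.Dict.ofList cm).getD ws[j] [] = cs := by
        rw [PySem.Dict.getD_eq_get?_getD, hget]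
        rfl
      rw [if_pos hmem, ctvPhi, hgd, List.Nodup.idxOf_getElem hnd j hjlen]
  rw [hAmap]
  -- rewrite B's sum as a sum over the dict keys
  have hBmap : ((PySem.Dict.ofList cm).items.map (fun e =>
          if e.1 ∈ ws ∧ 1 ≤ ws.idxOf e.1 ∧ ws.idxOf e.1 ≤ ws.length - 2
          then (e.2.countP (ctvStrad ws (ws.idxOf e.1)) : Int) else 0)).sum
      = ((PySem.Dict.ofList cm).keys.map (fun w => if w ∈ ctvL1 ws
          then ctvPhi ws (PySem.Dict.ofList cm) w else 0)).sum := by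
    rw [PySem.Dict.items_eq_map_keys _ hkeys [], List.map_map]
    congr 1
    apply List.map_congr_left
    intro w _
    simp only [Function.comp]
    by_cases hc : w ∈ ctvL1 ws
    · rw [if_pos hc, if_pos ((ctvL1Mem hnd w).1 hc), ctvPhi]
    · rw [if_neg hc, if_neg (fun hh => hc ((ctvL1Mem hnd w).2 hh))]
  rw [hBmap]
  exact ctvSumIte (ctvL1 ws) (PySem.Dict.ofList cm).keys
    (ctvPhi ws (PySem.Dict.ofList cm)) (ctvL1Nodup hnd) hkeys
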